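-- pv_equiv track=rewrite | github.com/akiddo-bob/hospitalist-scheduler | archive/block_schedule_engine.py | get_eligible_sites
-- ===== SOURCE A (Python) =====
-- def get_eligible_sites(provider_name, provider_data, tags_data):
--     """Return list of sites a provider can work at, based on percentages > 0."""
--     sites = []
--
--     pct_fields = {
--         "pct_cooper": ["Cooper"],
--         "pct_inspira_veb": ["Vineland", "Elmer"],
--         "pct_inspira_mhw": ["Mullica Hill"],
--         "pct_mannington": ["Mannington"],
--         "pct_virtua": ["Virtua Voorhees", "Virtua Marlton", "Virtua Willingboro", "Virtua Mt Holly"],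
--         "pct_cape": ["Cape"],
--     }
--
--     for pct_field, site_list in pct_fields.items():
--         if provider_data.get(pct_field, 0) > 0:
--             sites.extend(site_list)
--
--     # Apply tag-based restrictions
--     ptags = tags_data.get(provider_name, [])
--     for t in ptags:
--         tag = t["tag"]
--         if tag == "no_elmer":
--             sites = [s for s in sites if s != "Elmer"]
--         if tag == "no_vineland":
--             sites = [s for s in sites if s != "Vineland"]
--
--     return sites
-- ===== SOURCE B (Python) =====
-- def get_eligible_sites(provider_name, provider_data, tags_data):
--     """Return list of sites a provider can work at, based on percentages > 0."""
--     tags = {t["tag"] for t in tags_data.get(provider_name, [])}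
--     no_e = "no_elmer" in tags
--     no_v = "no_vineland" in tags
--
--     def on(field):
--         return provider_data.get(field, 0) > 0
--
--     sites = []
--     if on("pct_cooper"):
--         sites.append("Cooper")
--     if on("pct_inspira_veb"):
--         if not no_v:
--             sites.append("Vineland")
--         if not no_e:
--             sites.append("Elmer")
--     if on("pct_inspira_mhw"):
--         sites.append("Mullica Hill")
--     if on("pct_mannington"):
--         sites.append("Mannington")
--     if on("pct_virtua"):
--         sites += ["Virtua Voorhees", "Virtua Marlton", "Virtua Willingboro", "Virtua Mt Holly"]
--     if on("pct_cape"):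
--         sites.append("Cape")
--     return sites
-- ===== Notes on version B (the rewrite author's own statement) =====
-- stated objective: simpler
-- what changed: B first collects the provider's tag set and turns the two restriction tags into booleans, then emits the result as straight-line conditional appends per percentage field (no field table, no loop, no post-hoc list rebuilds), instead of A's build-full-list-then-filter-per-tag two-stage loops.
import Mathlib
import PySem

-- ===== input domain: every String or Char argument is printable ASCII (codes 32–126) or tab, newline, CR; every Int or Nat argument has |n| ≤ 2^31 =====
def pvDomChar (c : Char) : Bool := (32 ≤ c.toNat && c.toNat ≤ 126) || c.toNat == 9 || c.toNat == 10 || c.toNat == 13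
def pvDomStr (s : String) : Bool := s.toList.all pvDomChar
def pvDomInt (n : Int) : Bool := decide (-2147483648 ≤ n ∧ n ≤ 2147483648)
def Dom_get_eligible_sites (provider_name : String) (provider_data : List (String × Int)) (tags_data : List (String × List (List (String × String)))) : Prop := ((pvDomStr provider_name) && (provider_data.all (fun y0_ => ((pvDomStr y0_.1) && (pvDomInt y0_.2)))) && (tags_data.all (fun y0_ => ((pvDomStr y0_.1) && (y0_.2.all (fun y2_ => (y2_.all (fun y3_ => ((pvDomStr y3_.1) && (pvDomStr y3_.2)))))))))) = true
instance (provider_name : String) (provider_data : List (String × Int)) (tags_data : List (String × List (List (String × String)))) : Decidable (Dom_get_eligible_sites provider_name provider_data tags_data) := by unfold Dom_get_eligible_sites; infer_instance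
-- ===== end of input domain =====

-- B collects the provider's tag set into two booleans first and then emits the result as
-- straight-line conditional appends, replacing A's build-then-filter-per-tag loops
-- (objective: simpler).

-- ===== PORT A =====
def pctFieldsA : List (String × List String) :=
  [("pct_cooper", ["Cooper"]),
   ("pct_inspira_veb", ["Vineland", "Elmer"]),
   ("pct_inspira_mhw", ["Mullica Hill"]),
   ("pct_mannington", ["Mannington"]),
   ("pct_virtua", ["Virtua Voorhees", "Virtua Marlton", "Virtua Willingboro", "Virtua Mt Holly"]),
   ("pct_cape", ["Cape"])]

-- loop body of A's tag-restriction loop; `t["tag"]` raises KeyError when the key is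
-- absent — those inputs are excluded by Pre_, the `.getD ""` default is never reached there
def pvA_restrict (sites : List String) (t : List (String × String)) : List String :=
  let tag := ((PySem.Dict.mk t).get? "tag").getD ""
  let sites := if tag == "no_elmer" then sites.filter (fun s => s != "Elmer") else sites
  let sites := if tag == "no_vineland" then sites.filter (fun s => s != "Vineland") else sites
  sites

def get_eligible_sites (provider_name : String) (provider_data : List (String × Int)) (tags_data : List (String × List (List (String × String)))) : List String :=
  let sites := pctFieldsA.foldl (fun sites p => if (PySem.Dict.mk provider_data).getD p.1 0 > 0 then sites ++ p.2 else sites) []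
  let ptags := (PySem.Dict.mk tags_data).getD provider_name []
  ptags.foldl pvA_restrict sites

-- ===== PORT B =====
def get_eligible_sites_alt (provider_name : String) (provider_data : List (String × Int)) (tags_data : List (String × List (List (String × String)))) : List String :=
  -- tag set of this provider; `t["tag"]` as in A (KeyError excluded by Pre_)
  let tags : PySem.Set String :=
    PySem.Set.ofList (((PySem.Dict.mk tags_data).getD provider_name []).map
      (fun t => ((PySem.Dict.mk t).get? "tag").getD ""))
  let noE := PySem.Set.contains tags "no_elmer"
  let noV := PySem.Set.contains tags "no_vineland"
  let on_ := fun f => (PySem.Dict.mk provider_data).getD f 0 > 0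
  (if on_ "pct_cooper" then ["Cooper"] else []) ++
  (if on_ "pct_inspira_veb" then
      (if !noV then ["Vineland"] else []) ++ (if !noE then ["Elmer"] else [])
    else []) ++
  (if on_ "pct_inspira_mhw" then ["Mullica Hill"] else []) ++
  (if on_ "pct_mannington" then ["Mannington"] else []) ++
  (if on_ "pct_virtua" then ["Virtua Voorhees", "Virtua Marlton", "Virtua Willingboro", "Virtua Mt Holly"] else []) ++
  (if on_ "pct_cape" then ["Cape"] else [])

-- ===== PRECONDITION & SPEC =====
-- Pre_ excludes exactly the inputs on which A raises KeyError: a tag record of this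
-- provider without the key "tag" (B raises there too).
def Pre_get_eligible_sites (provider_name : String) (provider_data : List (String × Int)) (tags_data : List (String × List (List (String × String)))) : Prop :=
  ∀ t ∈ (PySem.Dict.mk tags_data).getD provider_name [], (PySem.Dict.mk t).contains "tag" = true
instance (provider_name : String) (provider_data : List (String × Int)) (tags_data : List (String × List (List (String × String)))) : Decidable (Pre_get_eligible_sites provider_name provider_data tags_data) := by unfold Pre_get_eligible_sites; infer_instance

def pvWitness_get_eligible_sites : String × (List (String × Int)) × (List (String × List (List (String × String)))) :=
  ("alice", [("pct_cooper", 1), ("pct_inspira_veb", 2)], [("alice", [[("tag", "no_elmer")]])])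

def Spec_get_eligible_sites (provider_name : String) (provider_data : List (String × Int)) (tags_data : List (String × List (List (String × String)))) (out : List String) : Prop := out = get_eligible_sites_alt provider_name provider_data tags_data
instance (provider_name : String) (provider_data : List (String × Int)) (tags_data : List (String × List (List (String × String)))) (out : List String) : Decidable (Spec_get_eligible_sites provider_name provider_data tags_data out) := by unfold Spec_get_eligible_sites; infer_instance

-- ===== CLAIM =====
def Claim_equal_get_eligible_sites : Prop := ∀ (provider_name : String) (provider_data : List (String × Int)) (tags_data : List (String × List (List (String × String)))), Dom_get_eligible_sites provider_name provider_data tags_data → Pre_get_eligible_sites provider_name provider_data tags_data → Spec_get_eligible_sites provider_name provider_data tags_data (get_eligible_sites provider_name provider_data tags_data)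

-- ===== LEMMAS AND PROOFS =====

-- tag string of a tag record
def pvTg (t : List (String × String)) : String := ((PySem.Dict.mk t).get? "tag").getD ""
-- does some tag of the list ban Elmer / Vineland?
def pvE (ptags : List (List (String × String))) : Bool := ptags.any (fun t => pvTg t == "no_elmer")
def pvV (ptags : List (List (String × String))) : Bool := ptags.any (fun t => pvTg t == "no_vineland")
def pvKeep (ptags : List (List (String × String))) (s : String) : Bool :=
  !(pvE ptags && s == "Elmer") && !(pvV ptags && s == "Vineland")

lemma pvKeep_nil : pvKeep [] = fun _ => true := by
  funext s; simp [pvKeep, pvE, pvV]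

lemma pvA_loop_eq_filter (ptags : List (List (String × String))) (sites : List String) :
    ptags.foldl pvA_restrict sites = sites.filter (pvKeep ptags) := by
  induction ptags generalizing sites with
  | nil => rw [List.foldl_nil, pvKeep_nil, List.filter_true]
  | cons t ts ih =>
      rw [List.foldl_cons, ih]
      have hstep : pvA_restrict sites t =
          sites.filter (fun s => !(pvTg t == "no_elmer" && s == "Elmer") && !(pvTg t == "no_vineland" && s == "Vineland")) := by
        unfold pvA_restrict pvTg
        cases hE : (((PySem.Dict.mk t).get? "tag").getD "" == "no_elmer") <;>
        cases hV : (((PySem.Dict.mk t).get? "tag").getD "" == "no_vineland") <;>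
          simp [hE, hV, List.filter_filter, Bool.and_comm, bne]
      rw [hstep, List.filter_filter]
      apply List.filter_congr
      intro s _
      simp only [pvKeep, pvE, pvV, List.any_cons]
      cases (pvTg t == "no_elmer") <;> cases (pvTg t == "no_vineland") <;>
      cases (s == "Elmer") <;> cases (s == "Vineland") <;> simp

lemma pvB_contains_eq (ptags : List (List (String × String))) (s : String) :
    PySem.Set.contains (PySem.Set.ofList (ptags.map
      (fun t => ((PySem.Dict.mk t).get? "tag").getD ""))) s = ptags.any (fun t => pvTg t == s) := by
  rw [Bool.eq_iff_iff, PySem.Set.contains_iff, PySem.Set.mem_ofList, List.mem_map, List.any_eq_true]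
  simp [pvTg]

lemma pv_ite_append (c : Prop) [Decidable c] (s l : List String) :
    (if c then s ++ l else s) = s ++ (if c then l else []) := by split <;> simp

lemma pv_filter_ite (f : String → Bool) (c : Prop) [Decidable c] (l : List String) :
    (if c then l else []).filter f = if c then l.filter f else [] := by split <;> simp

-- ===== VERDICT =====
theorem get_eligible_sites_spec : Claim_equal_get_eligible_sites := by
  intro pn pd td _ _
  show get_eligible_sites pn pd td = get_eligible_sites_alt pn pd td
  have hA : get_eligible_sites pn pd td =
      (pctFieldsA.foldl (fun sites p => if (PySem.Dict.mk pd).getD p.1 0 > 0 then sites ++ p.2 else sites) []).filter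
        (pvKeep ((PySem.Dict.mk td).getD pn [])) := by
    unfold get_eligible_sites
    exact pvA_loop_eq_filter _ _
  rw [hA]
  simp only [pctFieldsA, List.foldl_cons, List.foldl_nil, pv_ite_append, List.nil_append,
    List.append_assoc, List.filter_append, pv_filter_ite]
  simp only [get_eligible_sites_alt, pvB_contains_eq]
  set ptags := (PySem.Dict.mk td).getD pn [] with hpt
  cases hE : ptags.any (fun t => pvTg t == "no_elmer") <;>
  cases hV : ptags.any (fun t => pvTg t == "no_vineland") <;>
    simp [pvKeep, pvE, pvV, hE, hV, List.filter, List.append_assoc]
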